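-- pv_equiv track=rewrite | github.com/archsak/KnowFlow | src/stage_a/EvaluationResult.py | _analyze_phrase_patterns
-- ===== SOURCE A (Python) =====
-- from typing import Dict, List, Set
--
-- def _analyze_phrase_patterns(phrases: List[str]) -> Dict:
--     """Analyze patterns in a list of phrases."""
--     patterns = {
--         'single_word': 0,
--         'two_words': 0,
--         'multiple_words': 0,
--         'capitalized': 0,
--         'all_lowercase': 0,
--         'contains_numbers': 0,
--         'technical_terms': 0
--     }
--
--     technical_keywords = ['theory', 'principle', 'law', 'effect', 'method', 'algorithm', 'system']
--
--     for phrase in phrases: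
--         word_count = len(phrase.split())
--
--         if word_count == 1:
--             patterns['single_word'] += 1
--         elif word_count == 2:
--             patterns['two_words'] += 1
--         else:
--             patterns['multiple_words'] += 1
--
--         if phrase and phrase[0].isupper():
--             patterns['capitalized'] += 1
--         elif phrase.islower():
--             patterns['all_lowercase'] += 1
--
--         if any(char.isdigit() for char in phrase):
--             patterns['contains_numbers'] += 1
--
--         if any(keyword in phrase.lower() for keyword in technical_keywords):
--             patterns['technical_terms'] += 1
--
--     return patterns
-- ===== SOURCE B (Python) =====
-- def _analyze_phrase_patterns(phrases):
--     """Analyze patterns: emit a label stream per phrase, then tally it."""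
--     keys = ['single_word', 'two_words', 'multiple_words', 'capitalized',
--             'all_lowercase', 'contains_numbers', 'technical_terms']
--     technical_keywords = ['theory', 'principle', 'law', 'effect', 'method', 'algorithm', 'system']
--
--     def labels(p):
--         out = []
--         n = len(p.split())
--         out.append('single_word' if n == 1 else 'two_words' if n == 2 else 'multiple_words')
--         if p and p[0].isupper():
--             out.append('capitalized')
--         elif p.islower():
--             out.append('all_lowercase')
--         if any(c.isdigit() for c in p):
--             out.append('contains_numbers')
--         if any(k in p.lower() for k in technical_keywords):
--             out.append('technical_terms')
--         return out
--
--     stream = [lab for p in phrases for lab in labels(p)]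
--     return {k: stream.count(k) for k in keys}
-- ===== Notes on version B (the rewrite author's own statement) =====
-- stated objective: alternative
-- what changed: B maps each phrase to the list of category labels it triggers, flattens all labels into one stream, and builds the result dict by counting each key's occurrences in that stream, instead of A's fused loop mutating seven dict counters in place.
import Mathlib
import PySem

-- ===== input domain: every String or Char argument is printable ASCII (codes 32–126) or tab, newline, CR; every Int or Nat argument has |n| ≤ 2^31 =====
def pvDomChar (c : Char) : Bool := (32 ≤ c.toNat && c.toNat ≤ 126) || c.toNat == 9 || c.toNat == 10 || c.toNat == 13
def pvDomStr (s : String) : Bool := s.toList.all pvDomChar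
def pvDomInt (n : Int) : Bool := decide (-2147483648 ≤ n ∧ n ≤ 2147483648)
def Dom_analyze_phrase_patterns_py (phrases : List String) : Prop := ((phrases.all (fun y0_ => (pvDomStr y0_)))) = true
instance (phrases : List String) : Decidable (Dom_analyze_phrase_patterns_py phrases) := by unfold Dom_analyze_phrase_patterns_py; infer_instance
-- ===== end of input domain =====

-- B maps each phrase to the list of category labels it triggers, flattens all labels into one
-- stream, and builds the result by counting each key in that stream, instead of A's fused loop
-- mutating seven dict counters (objective: alternative).

-- ===== PORT A =====

-- s.islower(): hand port (no PySem primitive); exact on the ASCII domain, where the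
-- cased characters are exactly the letters: some cased char, and no uppercase cased char.
def pvIslower (l : List Char) : Bool :=
  l.any (fun c => PySem.Chars.isalpha c) &&
    l.all (fun c => !PySem.Chars.isalpha c || PySem.Chars.islower c)

def pvTechnicalKeywords : List String :=
  ["theory", "principle", "law", "effect", "method", "algorithm", "system"]

-- the body of A's for-loop, one helper per if-block of A
def pvStepWc (d : PySem.Dict String Int) (word_count : Nat) : PySem.Dict String Int :=
  if word_count == 1 then d.modify "single_word" 0 (· + 1)
  else if word_count == 2 then d.modify "two_words" 0 (· + 1)
  else d.modify "multiple_words" 0 (· + 1)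

def pvStepCase (d : PySem.Dict String Int) (phrase : String) : PySem.Dict String Int :=
  if (match phrase.toList with | c :: _ => PySem.Chars.isupper c | [] => false) then
    d.modify "capitalized" 0 (· + 1)
  else if pvIslower phrase.toList then d.modify "all_lowercase" 0 (· + 1)
  else d

def pvStepDigit (d : PySem.Dict String Int) (phrase : String) : PySem.Dict String Int :=
  if phrase.toList.any (fun c => PySem.Chars.isdigit c) then d.modify "contains_numbers" 0 (· + 1)
  else d

def pvStepTech (d : PySem.Dict String Int) (phrase : String) : PySem.Dict String Int :=
  if pvTechnicalKeywords.any (fun k => PySem.Str.isIn k (PySem.Str.lower phrase)) then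
    d.modify "technical_terms" 0 (· + 1)
  else d

def pvStepA (d : PySem.Dict String Int) (phrase : String) : PySem.Dict String Int :=
  pvStepTech (pvStepDigit (pvStepCase (pvStepWc d (PySem.Str.split₀ phrase).length) phrase) phrase) phrase

def analyze_phrase_patterns_py (phrases : List String) : List (String × Int) :=
  let init : PySem.Dict String Int :=
    PySem.Dict.ofList [("single_word", 0), ("two_words", 0), ("multiple_words", 0),
      ("capitalized", 0), ("all_lowercase", 0), ("contains_numbers", 0), ("technical_terms", 0)]
  (phrases.foldl pvStepA init).items

-- ===== PORT B =====

-- p and p[0].isupper()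
def pvFirstUpper (phrase : String) : Bool :=
  match phrase.toList with
  | c :: _ => PySem.Chars.isupper c
  | [] => false

def pvKeys : List String :=
  ["single_word", "two_words", "multiple_words", "capitalized",
   "all_lowercase", "contains_numbers", "technical_terms"]

-- labels(p): the list of category labels this phrase triggers
def pvLabels (p : String) : List String :=
  let n := (PySem.Str.split₀ p).length
  let out0 := [if n == 1 then "single_word" else if n == 2 then "two_words" else "multiple_words"]
  let out1 := if pvFirstUpper p then out0 ++ ["capitalized"]
              else if pvIslower p.toList then out0 ++ ["all_lowercase"] else out0
  let out2 := if p.toList.any (fun c => PySem.Chars.isdigit c) then out1 ++ ["contains_numbers"]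
              else out1
  if pvTechnicalKeywords.any (fun k => PySem.Str.isIn k (PySem.Str.lower p)) then
    out2 ++ ["technical_terms"]
  else out2

def analyze_phrase_patterns_py_alt (phrases : List String) : List (String × Int) :=
  let stream := phrases.flatMap pvLabels
  pvKeys.map (fun k => (k, (stream.count k : Int)))

-- ===== PRECONDITION & SPEC =====
def Spec_analyze_phrase_patterns_py (phrases : List String) (out : List (String × Int)) : Prop := out = analyze_phrase_patterns_py_alt phrases
instance (phrases : List String) (out : List (String × Int)) : Decidable (Spec_analyze_phrase_patterns_py phrases out) := by unfold Spec_analyze_phrase_patterns_py; infer_instance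

-- ===== CLAIM (what is proved, stated in full; the proofs are below) =====
def Claim_equal_analyze_phrase_patterns_py : Prop := ∀ (phrases : List String), Dom_analyze_phrase_patterns_py phrases → Spec_analyze_phrase_patterns_py phrases (analyze_phrase_patterns_py phrases)

-- ===== LEMMAS AND PROOFS =====

-- one step of A's loop on a dict in the invariant shape
theorem pvStepWc_items (a b c d e f g : Int) (wc : Nat) :
    pvStepWc (PySem.Dict.ofList [("single_word", a), ("two_words", b), ("multiple_words", c),
      ("capitalized", d), ("all_lowercase", e), ("contains_numbers", f), ("technical_terms", g)]) wc
    = PySem.Dict.ofList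
      [("single_word", if wc == 1 then a + 1 else a),
       ("two_words", if wc == 1 then b else if wc == 2 then b + 1 else b),
       ("multiple_words", if wc == 1 then c else if wc == 2 then c else c + 1),
       ("capitalized", d), ("all_lowercase", e), ("contains_numbers", f), ("technical_terms", g)] := by
  unfold pvStepWc; split_ifs <;> simp [PySem.Dict.modify, PySem.Dict.insert, PySem.Dict.getD, PySem.Dict.get?, PySem.Dict.contains, PySem.Dict.ofList, PySem.Dict.update, PySem.Dict.empty, List.find?, List.foldl]

theorem pvStepCase_items (a b c d e f g : Int) (p : String) :
    pvStepCase (PySem.Dict.ofList [("single_word", a), ("two_words", b), ("multiple_words", c),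
      ("capitalized", d), ("all_lowercase", e), ("contains_numbers", f), ("technical_terms", g)]) p
    = PySem.Dict.ofList
      [("single_word", a), ("two_words", b), ("multiple_words", c),
       ("capitalized", if pvFirstUpper p then d + 1 else d),
       ("all_lowercase", if pvFirstUpper p then e else if pvIslower p.toList then e + 1 else e),
       ("contains_numbers", f), ("technical_terms", g)] := by
  unfold pvStepCase pvFirstUpper; split_ifs <;> simp [PySem.Dict.modify, PySem.Dict.insert, PySem.Dict.getD, PySem.Dict.get?, PySem.Dict.contains, PySem.Dict.ofList, PySem.Dict.update, PySem.Dict.empty, List.find?, List.foldl]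

theorem pvStepDigit_items (a b c d e f g : Int) (p : String) :
    pvStepDigit (PySem.Dict.ofList [("single_word", a), ("two_words", b), ("multiple_words", c),
      ("capitalized", d), ("all_lowercase", e), ("contains_numbers", f), ("technical_terms", g)]) p
    = PySem.Dict.ofList
      [("single_word", a), ("two_words", b), ("multiple_words", c), ("capitalized", d),
       ("all_lowercase", e),
       ("contains_numbers", if p.toList.any (fun c => PySem.Chars.isdigit c) then f + 1 else f),
       ("technical_terms", g)] := by
  unfold pvStepDigit; split_ifs <;> simp [PySem.Dict.modify, PySem.Dict.insert, PySem.Dict.getD, PySem.Dict.get?, PySem.Dict.contains, PySem.Dict.ofList, PySem.Dict.update, PySem.Dict.empty, List.find?, List.foldl]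

theorem pvStepTech_items (a b c d e f g : Int) (p : String) :
    pvStepTech (PySem.Dict.ofList [("single_word", a), ("two_words", b), ("multiple_words", c),
      ("capitalized", d), ("all_lowercase", e), ("contains_numbers", f), ("technical_terms", g)]) p
    = PySem.Dict.ofList
      [("single_word", a), ("two_words", b), ("multiple_words", c), ("capitalized", d),
       ("all_lowercase", e), ("contains_numbers", f),
       ("technical_terms", if pvTechnicalKeywords.any (fun k => PySem.Str.isIn k (PySem.Str.lower p)) then g + 1 else g)] := by
  unfold pvStepTech; split_ifs <;> simp [PySem.Dict.modify, PySem.Dict.insert, PySem.Dict.getD, PySem.Dict.get?, PySem.Dict.contains, PySem.Dict.ofList, PySem.Dict.update, PySem.Dict.empty, List.find?, List.foldl]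

-- the whole loop body, restated with per-key 0/1 increments matching pvLabels' counts
theorem pvStepA_items (a b c d e f g : Int) (p : String) :
    pvStepA (PySem.Dict.ofList [("single_word", a), ("two_words", b), ("multiple_words", c),
      ("capitalized", d), ("all_lowercase", e), ("contains_numbers", f), ("technical_terms", g)]) p
    = PySem.Dict.ofList
      [("single_word", a + ((pvLabels p).count "single_word" : Int)),
       ("two_words", b + ((pvLabels p).count "two_words" : Int)),
       ("multiple_words", c + ((pvLabels p).count "multiple_words" : Int)),
       ("capitalized", d + ((pvLabels p).count "capitalized" : Int)),
       ("all_lowercase", e + ((pvLabels p).count "all_lowercase" : Int)),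
       ("contains_numbers", f + ((pvLabels p).count "contains_numbers" : Int)),
       ("technical_terms", g + ((pvLabels p).count "technical_terms" : Int))] := by
  unfold pvStepA
  rw [pvStepWc_items, pvStepCase_items, pvStepDigit_items, pvStepTech_items]
  unfold pvLabels
  split_ifs <;> simp_all [List.count_nil]

-- the whole fold, by induction generalising the seven counters
theorem pvFold_items (phrases : List String) (a b c d e f g : Int) :
    (phrases.foldl pvStepA (PySem.Dict.ofList [("single_word", a), ("two_words", b),
        ("multiple_words", c), ("capitalized", d), ("all_lowercase", e),
        ("contains_numbers", f), ("technical_terms", g)])).items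
    = [("single_word", a + ((phrases.flatMap pvLabels).count "single_word" : Int)),
       ("two_words", b + ((phrases.flatMap pvLabels).count "two_words" : Int)),
       ("multiple_words", c + ((phrases.flatMap pvLabels).count "multiple_words" : Int)),
       ("capitalized", d + ((phrases.flatMap pvLabels).count "capitalized" : Int)),
       ("all_lowercase", e + ((phrases.flatMap pvLabels).count "all_lowercase" : Int)),
       ("contains_numbers", f + ((phrases.flatMap pvLabels).count "contains_numbers" : Int)),
       ("technical_terms", g + ((phrases.flatMap pvLabels).count "technical_terms" : Int))] := by
  induction phrases generalizing a b c d e f g with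
  | nil => simp only [List.foldl_nil, List.flatMap_nil, List.count_nil, Nat.cast_zero, add_zero]; simp [PySem.Dict.insert, PySem.Dict.contains, PySem.Dict.ofList, PySem.Dict.update, PySem.Dict.empty, List.foldl]
  | cons p rest ih =>
    simp only [List.foldl_cons, pvStepA_items, ih, List.flatMap_cons, List.count_append]
    push_cast
    ring_nf

-- ===== VERDICT (by name: the statement is the Claim_ definition above) =====
theorem analyze_phrase_patterns_py_spec : Claim_equal_analyze_phrase_patterns_py := by
  intro phrases _
  unfold Spec_analyze_phrase_patterns_py analyze_phrase_patterns_py analyze_phrase_patterns_py_alt pvKeys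
  simp only [pvFold_items, Int.zero_add, List.map_cons, List.map_nil]
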